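-- pv_equiv track=rewrite | github.com/youssef-e/Pytesseract-Opencv | Utils/Extract_Utils.py | mean_length_mrz
-- ===== SOURCE A (Python) =====
-- def mean_length_mrz(words):
--     mean_lengths=[]
--     max_occur=0
--     mean_length=0
--     for word in words:
--         if word != "-1":
--             mean_lengths.append(len(word))
--     for length in mean_lengths:
--         if(length == 36):
--             return  length
--         if(max_occur<mean_lengths.count(length)):
--             max_occur=mean_lengths.count(length)
--             mean_length = length
--         if(isinstance(mean_length,str)):
--             mean_length = 0
--     return mean_length
-- ===== SOURCE B (Python) =====
-- def mean_length_mrz(words):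
--     lengths = [len(w) for w in words if w != "-1"]
--     if 36 in lengths:
--         return 36
--     best_cnt = 0
--     best_len = 0
--     rest = lengths
--     while rest:
--         v = rest[0]
--         remaining = [x for x in rest if x != v]
--         cnt = len(rest) - len(remaining)
--         if cnt > best_cnt:
--             best_cnt, best_len = cnt, v
--         rest = remaining
--     return best_len
-- ===== Notes on version B (the rewrite author's own statement) =====
-- stated objective: faster
-- what changed: Replaces A's per-element scan that calls list.count on every element with a successive-extraction loop: repeatedly take the first remaining length, partition it out of the list, obtain its count as the length difference, keep a strict running argmax; the 36 early-return becomes one upfront membership test.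
import Mathlib
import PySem

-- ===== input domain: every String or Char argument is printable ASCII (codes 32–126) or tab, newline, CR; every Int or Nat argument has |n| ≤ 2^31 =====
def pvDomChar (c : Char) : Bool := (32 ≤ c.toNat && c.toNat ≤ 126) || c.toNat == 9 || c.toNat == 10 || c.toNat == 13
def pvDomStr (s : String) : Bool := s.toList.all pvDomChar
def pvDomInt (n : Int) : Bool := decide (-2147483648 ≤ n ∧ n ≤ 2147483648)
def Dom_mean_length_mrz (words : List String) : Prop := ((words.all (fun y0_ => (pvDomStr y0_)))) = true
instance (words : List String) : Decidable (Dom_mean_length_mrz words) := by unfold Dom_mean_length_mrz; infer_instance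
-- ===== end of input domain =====

-- B replaces A's per-element list.count scan with a successive-extraction loop that
-- partitions out one distinct length at a time (objective: alternative algorithm).


-- ===== PORT A =====
-- A's second loop: early return on 36, else running strict-max of total counts.
-- (A's 'isinstance(mean_length, str)' branch is statically false on ints and has no Lean counterpart.)
def pvLoopA (all : List Int) (mo ml : Int) : List Int → Int
  | [] => ml
  | l :: rest =>
    if l = 36 then l
    else if mo < (PySem.List.count all l : Int) then
      pvLoopA all (PySem.List.count all l : Int) l rest
    else pvLoopA all mo ml rest

def mean_length_mrz (words : List String) : Int :=
  let mean_lengths := words.foldl (fun acc w => if w != "-1" then acc ++ [PySem.Str.len w] else acc) []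
  pvLoopA mean_lengths 0 0 mean_lengths

-- ===== PORT B =====
-- B's while loop: take the head value, filter it out, count = length difference, strict argmax.
def pvLoopB : List Int → Int → Int → Int
  | [], _, bl => bl
  | v :: t, bc, bl =>
    let remaining := List.filter (fun x => x != v) (v :: t)
    let cnt : Int := ((v :: t).length : Int) - (remaining.length : Int)
    if bc < cnt then pvLoopB remaining cnt v else pvLoopB remaining bc bl
termination_by r _ _ => r.length
decreasing_by
  all_goals
    simp only [List.filter_cons, bne_self_eq_false, Bool.false_eq_true, if_false,
      List.length_cons]
    exact Nat.lt_succ_of_le (List.length_filter_le _ _)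

def mean_length_mrz_alt (words : List String) : Int :=
  let lengths := (words.filter (fun w => w != "-1")).map PySem.Str.len
  if (36 : Int) ∈ lengths then 36
  else pvLoopB lengths 0 0

-- ===== PRECONDITION & SPEC =====
def Spec_mean_length_mrz (words : List String) (out : Int) : Prop := out = mean_length_mrz_alt words
instance (words : List String) (out : Int) : Decidable (Spec_mean_length_mrz words out) := by unfold Spec_mean_length_mrz; infer_instance

-- ===== CLAIM (what is proved, stated in full; the proofs are below) =====
def Claim_equal_mean_length_mrz : Prop := ∀ (words : List String), Dom_mean_length_mrz words → Spec_mean_length_mrz words (mean_length_mrz words)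

-- ===== LEMMAS AND PROOFS =====

-- the pure step of A's running-max loop (no early return)
def pvStep (all : List Int) (p : Int × Int) (l : Int) : Int × Int :=
  if p.1 < (PySem.List.count all l : Int) then ((PySem.List.count all l : Int), l) else p

lemma pvLoopA_of_mem_36 (all : List Int) (mo ml : Int) (xs : List Int)
    (h : (36 : Int) ∈ xs) : pvLoopA all mo ml xs = 36 := by
  induction xs generalizing mo ml with
  | nil => cases h
  | cons x t ih =>
    by_cases hx : x = 36
    · simp [pvLoopA, hx]
    · have ht : (36 : Int) ∈ t := by
        rcases List.mem_cons.mp h with h1 | h1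
        · exact absurd h1.symm hx
        · exact h1
      simp only [pvLoopA, if_neg hx]
      split_ifs <;> exact ih _ _ ht

lemma pvLoopA_eq_foldl (all : List Int) (mo ml : Int) (xs : List Int)
    (h : (36 : Int) ∉ xs) : pvLoopA all mo ml xs = (xs.foldl (pvStep all) (mo, ml)).2 := by
  induction xs generalizing mo ml with
  | nil => rfl
  | cons x t ih =>
    have hx : x ≠ 36 := fun hh => h (hh ▸ List.mem_cons_self)
    have ht : (36 : Int) ∉ t := fun hh => h (List.mem_cons_of_mem _ hh)
    simp only [pvLoopA, if_neg hx, List.foldl_cons, pvStep]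
    split_ifs with hc <;> simp [ih _ _ ht]

lemma pvStep_fst_le (all : List Int) (p : Int × Int) (l : Int) : p.1 ≤ (pvStep all p l).1 := by
  unfold pvStep; split_ifs with hc
  · exact le_of_lt hc
  · exact le_refl _

-- the Set.add fold only appends to its seed
lemma pvSetFold_prefix (xs : List Int) (s : List Int) :
    s <+: xs.foldl PySem.Set.add s := by
  induction xs generalizing s with
  | nil => exact List.prefix_refl s
  | cons x t ih =>
    refine List.IsPrefix.trans ?_ (ih (PySem.Set.add s x))
    unfold PySem.Set.add
    split_ifs
    · exact List.prefix_refl s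
    · exact List.prefix_append s [x]

-- running A's pure loop over the raw list equals running it over the fresh part of the Set fold
lemma pvFoldl_dedup (all : List Int) :
    ∀ (xs : List Int) (s : List Int) (p : Int × Int),
      (∀ v ∈ s, (PySem.List.count all v : Int) ≤ p.1) →
      xs.foldl (pvStep all) p = ((xs.foldl PySem.Set.add s).drop s.length).foldl (pvStep all) p := by
  intro xs
  induction xs with
  | nil => intro s p _; simp
  | cons x t ih =>
    intro s p hp
    by_cases hx : x ∈ s
    · have hnoop : pvStep all p x = p := by
        unfold pvStep; rw [if_neg (not_lt.mpr (hp x hx))]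
      have hadd : PySem.Set.add s x = s := by
        unfold PySem.Set.add
        rw [if_pos (by simpa [PySem.Set.contains] using hx)]
      simp only [List.foldl_cons, hnoop, hadd]
      exact ih s p hp
    · have hadd : PySem.Set.add s x = s ++ [x] := by
        unfold PySem.Set.add
        rw [if_neg (by simpa [PySem.Set.contains] using hx)]
      have hp' : ∀ v ∈ s ++ [x], (PySem.List.count all v : Int) ≤ (pvStep all p x).1 := by
        intro v hv
        rcases List.mem_append.mp hv with h1 | h1
        · exact le_trans (hp v h1) (pvStep_fst_le all p x)
        · have hvx : v = x := by simpa using h1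
          subst hvx
          unfold pvStep; split_ifs with hc
          · exact le_refl _
          · exact not_lt.mp hc
      have ihx := ih (s ++ [x]) (pvStep all p x) hp'
      obtain ⟨r, hr⟩ := pvSetFold_prefix t (s ++ [x])
      simp only [List.foldl_cons, hadd, ihx, ← hr]
      have h1 : ((s ++ [x]) ++ r).drop (s ++ [x]).length = r := by simp
      have h2 : ((s ++ [x]) ++ r).drop s.length = x :: r := by
        rw [List.append_assoc, List.drop_append_of_le_length (le_refl _)]
        simp
      rw [h1, h2, List.foldl_cons]

-- Set.ofList commutes with filter (generalised over the seed)
lemma pvFoldlAdd_filter (p : Int → Bool) (l : List Int) :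
    ∀ s : List Int, (l.filter p).foldl PySem.Set.add (s.filter p)
      = (l.foldl PySem.Set.add s).filter p := by
  induction l with
  | nil => intro s; rfl
  | cons x t ih =>
    intro s
    have hadd : PySem.Set.add (s.filter p) x = (PySem.Set.add s x).filter p ∨ p x = false := by
      by_cases hpx : p x = true
      · left
        by_cases hxs : x ∈ s
        · rw [PySem.Set.add_of_mem hxs, PySem.Set.add_of_mem (List.mem_filter.mpr ⟨hxs, hpx⟩)]
        · rw [PySem.Set.add_of_not_mem hxs,
            PySem.Set.add_of_not_mem (fun hc => hxs (List.mem_filter.mp hc).1),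
            List.filter_append]
          simp [hpx]
      · right; simpa using hpx
    by_cases hpx : p x = true
    · rcases hadd with hadd | hadd
      · simp only [List.filter_cons, hpx, if_true, List.foldl_cons, hadd]
        exact ih (PySem.Set.add s x)
      · simp [hpx] at hadd
    · have hsame : (PySem.Set.add s x).filter p = s.filter p := by
        by_cases hxs : x ∈ s
        · rw [PySem.Set.add_of_mem hxs]
        · rw [PySem.Set.add_of_not_mem hxs, List.filter_append]
          simp [hpx]
      simp only [List.filter_cons, hpx, if_false, List.foldl_cons, Bool.false_eq_true]
      rw [← hsame]
      exact ih (PySem.Set.add s x)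

lemma pvOfList_filter (p : Int → Bool) (l : List Int) :
    PySem.Set.ofList (l.filter p) = (PySem.Set.ofList l).filter p := by
  have h := pvFoldlAdd_filter p l []
  simpa [PySem.Set.ofList_eq_foldl] using h

-- elements already in the seed may be dropped from the fold
lemma pvFoldlAdd_drop_mem (v : Int) (l : List Int) :
    ∀ s : List Int, v ∈ s →
      l.foldl PySem.Set.add s = (l.filter (fun x => x != v)).foldl PySem.Set.add s := by
  induction l with
  | nil => intro s _; rfl
  | cons x t ih =>
    intro s hv
    by_cases hxv : x = v
    · subst hxv
      simp only [List.filter_cons, bne_self_eq_false, Bool.false_eq_true, if_false,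
        List.foldl_cons, PySem.Set.add_of_mem hv]
      exact ih s hv
    · have hb : (x != v) = true := by simpa using hxv
      simp only [List.filter_cons, hb, if_true, List.foldl_cons]
      exact ih (PySem.Set.add s x) (by rw [PySem.Set.add_eq_ite]; split_ifs <;> simp [hv])

-- a fold over elements all different from v keeps v at the head of the seed
lemma pvFoldlAdd_cons_seed (v : Int) (l : List Int) (hvl : v ∉ l) :
    ∀ s : List Int, l.foldl PySem.Set.add (v :: s) = v :: l.foldl PySem.Set.add s := by
  induction l with
  | nil => intro s; rfl
  | cons x t ih =>
    intro s
    have hxv : x ≠ v := fun h => hvl (h ▸ List.mem_cons_self)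
    have ht : v ∉ t := fun h => hvl (List.mem_cons_of_mem _ h)
    have hadd : PySem.Set.add (v :: s) x = v :: PySem.Set.add s x := by
      by_cases hxs : x ∈ s
      · rw [PySem.Set.add_of_mem hxs, PySem.Set.add_of_mem (List.mem_cons_of_mem _ hxs)]
      · rw [PySem.Set.add_of_not_mem hxs,
          PySem.Set.add_of_not_mem (by simp [hxs, hxv]), List.cons_append]
    simp only [List.foldl_cons, hadd]
    exact (ih ht) (PySem.Set.add s x)

-- first-occurrence dedup of v :: l
lemma pvOfList_cons (v : Int) (l : List Int) :
    PySem.Set.ofList (v :: l) = v :: (PySem.Set.ofList l).filter (fun x => x != v) := by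
  have h0 : PySem.Set.ofList (v :: l) = l.foldl PySem.Set.add [v] := by
    simp [PySem.Set.ofList_eq_foldl, PySem.Set.add]
  have h1 := pvFoldlAdd_drop_mem v l [v] (List.mem_singleton.mpr rfl)
  have hvnot : v ∉ l.filter (fun x => x != v) := by
    intro hc
    have := (List.mem_filter.mp hc).2
    simp at this
  have h2 := pvFoldlAdd_cons_seed v (l.filter (fun x => x != v)) hvnot []
  rw [h0, h1, h2, ← PySem.Set.ofList_eq_foldl, pvOfList_filter]

lemma pvFilterCount (t : List Int) (v : Int) :
    (t.filter (fun x => x != v)).length + t.count v = t.length := by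
  induction t with
  | nil => rfl
  | cons x s ih =>
    by_cases h : x = v
    · subst h; simp; omega
    · simp [h]; omega


-- B's successive-extraction loop computes the strict running argmax of counts
-- over the distinct values in first-occurrence order
lemma pvLoopB_eq (r : List Int) (bc bl : Int) :
    pvLoopB r bc bl =
      ((PySem.Set.ofList r).foldl
        (fun q v => if q.1 < (List.count v r : Int) then ((List.count v r : Int), v) else q)
        (bc, bl)).2 := by
  induction r, bc, bl using pvLoopB.induct with
  | case1 bc bl => simp [pvLoopB, PySem.Set.ofList]
  | case2 v t bc bl remaining cnt h ih1 =>
    have hrem : remaining = List.filter (fun x => x != v) t := by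
      simp only [remaining, List.filter_cons, bne_self_eq_false, Bool.false_eq_true, if_false]
    have hfc := pvFilterCount t v
    have hcnt : cnt = (List.count v (v :: t) : Int) := by
      simp only [cnt, hrem, List.length_cons, List.count_cons_self]
      omega
    have hL : pvLoopB (v :: t) bc bl = if bc < cnt then pvLoopB remaining cnt v else pvLoopB remaining bc bl := by
      rw [pvLoopB]
    have hS : PySem.Set.ofList remaining = (PySem.Set.ofList t).filter (fun x => x != v) := by
      rw [hrem, pvOfList_filter]
    have htail : ∀ p : Int × Int,
        (PySem.Set.ofList remaining).foldl
          (fun q w => if q.1 < (List.count w remaining : Int) then ((List.count w remaining : Int), w) else q) p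
        = ((PySem.Set.ofList t).filter (fun x => x != v)).foldl
          (fun q w => if q.1 < (List.count w (v :: t) : Int) then ((List.count w (v :: t) : Int), w) else q) p := by
      intro p
      rw [hS]
      refine PySem.List.foldl_congr_mem _ _ _ _ ?_
      intro acc x hx
      have hxv : (fun y => y != v) x = true := (List.mem_filter.mp hx).2
      have hxv' : x ≠ v := by simpa using hxv
      have hc : List.count x remaining = List.count x (v :: t) := by
        rw [hrem, List.count_filter (p := fun y => y != v) (a := x) hxv]
        simp [List.count_cons]
        omega
      simp only [hc]
    rw [hL, if_pos h, ih1, htail, pvOfList_cons, List.foldl_cons]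
    have hseed : (if ((bc, bl) : Int × Int).1 < (List.count v (v :: t) : Int) then ((List.count v (v :: t) : Int), v) else (bc, bl)) = (cnt, v) := by
      show (if bc < (List.count v (v :: t) : Int) then ((List.count v (v :: t) : Int), v) else (bc, bl)) = (cnt, v)
      rw [← hcnt, if_pos h]
    rw [hseed]
  | case3 v t bc bl remaining cnt h ih1 =>
    have hrem : remaining = List.filter (fun x => x != v) t := by
      simp only [remaining, List.filter_cons, bne_self_eq_false, Bool.false_eq_true, if_false]
    have hfc := pvFilterCount t v
    have hcnt : cnt = (List.count v (v :: t) : Int) := by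
      simp only [cnt, hrem, List.length_cons, List.count_cons_self]
      omega
    have hL : pvLoopB (v :: t) bc bl = if bc < cnt then pvLoopB remaining cnt v else pvLoopB remaining bc bl := by
      rw [pvLoopB]
    have hS : PySem.Set.ofList remaining = (PySem.Set.ofList t).filter (fun x => x != v) := by
      rw [hrem, pvOfList_filter]
    have htail : ∀ p : Int × Int,
        (PySem.Set.ofList remaining).foldl
          (fun q w => if q.1 < (List.count w remaining : Int) then ((List.count w remaining : Int), w) else q) p
        = ((PySem.Set.ofList t).filter (fun x => x != v)).foldl
          (fun q w => if q.1 < (List.count w (v :: t) : Int) then ((List.count w (v :: t) : Int), w) else q) p := by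
      intro p
      rw [hS]
      refine PySem.List.foldl_congr_mem _ _ _ _ ?_
      intro acc x hx
      have hxv : (fun y => y != v) x = true := (List.mem_filter.mp hx).2
      have hxv' : x ≠ v := by simpa using hxv
      have hc : List.count x remaining = List.count x (v :: t) := by
        rw [hrem, List.count_filter (p := fun y => y != v) (a := x) hxv]
        simp [List.count_cons]
        omega
      simp only [hc]
    rw [hL, if_neg h, ih1, htail, pvOfList_cons, List.foldl_cons]
    have hseed : (if ((bc, bl) : Int × Int).1 < (List.count v (v :: t) : Int) then ((List.count v (v :: t) : Int), v) else (bc, bl)) = (bc, bl) := by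
      show (if bc < (List.count v (v :: t) : Int) then ((List.count v (v :: t) : Int), v) else (bc, bl)) = (bc, bl)
      rw [← hcnt, if_neg h]
    rw [hseed]

-- ===== VERDICT (by name: the statement is the Claim_ definition above) =====
theorem mean_length_mrz_spec : Claim_equal_mean_length_mrz := by
  intro words _
  unfold Spec_mean_length_mrz mean_length_mrz mean_length_mrz_alt
  rw [PySem.List.foldl_append_if]
  simp only [List.nil_append]
  set L := (words.filter (fun w => w != "-1")).map PySem.Str.len with hLdef
  by_cases h36 : (36 : Int) ∈ L
  · rw [if_pos h36, pvLoopA_of_mem_36 _ _ _ _ h36]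
  · rw [if_neg h36, pvLoopA_eq_foldl _ _ _ _ h36, pvLoopB_eq]
    have hded := pvFoldl_dedup L L [] (0, 0) (by intro v hv; cases hv)
    simp only [List.length_nil, List.drop_zero] at hded
    have hofl : PySem.Set.ofList L = L.foldl PySem.Set.add [] := PySem.Set.ofList_eq_foldl L
    rw [hded, ← hofl]
    have hfg := PySem.List.foldl_congr_mem (PySem.Set.ofList L) (pvStep L)
      (fun q v => if q.1 < (List.count v L : Int) then ((List.count v L : Int), v) else q)
      ((0 : Int), (0 : Int))
      (fun acc x _ => by simp [pvStep, PySem.List.count_eq])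
    rw [hfg]
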